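-- pv_equiv track=rewrite | github.com/feysalh1/castle | public/app/create_story_pages.py | split_text_into_pages
-- ===== SOURCE A (Python) =====
-- def split_text_into_pages(text, pages=3):
--     """
--     Split a story text into separate pages
--
--     Args:
--         text (str): The full story text
--         pages (int): Number of pages to split into
--
--     Returns:
--         list: List of text segments for each page
--     """
--     # Split by sentences (simple version - a real app would use NLP)
--     sentences = []
--     # Split on periods, question marks, and exclamation points
--     for part in text.replace('!', '.').replace('?', '.').split('.'):
--         if part.strip():
--             sentences.append(part.strip() + '.')
--
--     # Group sentences into pages
--     if not sentences:
--         return []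
--
--     # Adjust page count if we have fewer sentences
--     page_count = min(pages, len(sentences))
--     sentences_per_page = max(1, len(sentences) // page_count)
--
--     page_texts = []
--     for i in range(0, len(sentences), sentences_per_page):
--         page_sentences = sentences[i:i + sentences_per_page]
--         page_texts.append(' '.join(page_sentences))
--
--         # Stop if we've created enough pages
--         if len(page_texts) >= page_count:
--             # Add any remaining sentences to the last page
--             if i + sentences_per_page < len(sentences):
--                 remaining = ' '.join(sentences[i + sentences_per_page:])
--                 page_texts[-1] = page_texts[-1] + ' ' + remaining
--             break
--
--     return page_texts
-- ===== SOURCE B (Python) =====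
-- def split_text_into_pages(text, pages=3):
--     """Split a story text into pages: one streaming pass over the sentences
--     with an output/buffer accumulator (no slicing, no stride arithmetic)."""
--     sentences = [p.strip() + '.'
--                  for p in text.replace('!', '.').replace('?', '.').split('.')
--                  if p.strip()]
--     if not sentences:
--         return []
--     n = len(sentences)
--     page_count = max(1, min(pages, n))
--     per = max(1, n // page_count)
--     out = []
--     buf = []
--     for s in sentences:
--         buf.append(s)
--         if len(buf) == per and len(out) < page_count - 1:
--             out.append(' '.join(buf))
--             buf = []
--     out.append(' '.join(buf))
--     return out
-- ===== Notes on version B (the rewrite author's own statement) =====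
-- stated objective: alternative
-- what changed: A's stride loop over range(0, n, spp) taking slices, with an early break and a remainder-merge patch of the last page, is replaced by a single streaming pass over the sentences with an output/buffer accumulator that flushes a page whenever the buffer fills and fewer than page_count-1 pages exist; no slicing or index arithmetic.
-- outside the precondition, e.g. on split_text_into_pages('', 0): A returns [], B returns []
-- crash fix: When pages == 0 and the text contains a sentence (some non-whitespace, non-punctuation character), A raises ZeroDivisionError; B returns the whole story as a single page. — e.g. on split_text_into_pages("Hi", 0): A raises ZeroDivisionError, B returns ["Hi."]
import Mathlib
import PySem

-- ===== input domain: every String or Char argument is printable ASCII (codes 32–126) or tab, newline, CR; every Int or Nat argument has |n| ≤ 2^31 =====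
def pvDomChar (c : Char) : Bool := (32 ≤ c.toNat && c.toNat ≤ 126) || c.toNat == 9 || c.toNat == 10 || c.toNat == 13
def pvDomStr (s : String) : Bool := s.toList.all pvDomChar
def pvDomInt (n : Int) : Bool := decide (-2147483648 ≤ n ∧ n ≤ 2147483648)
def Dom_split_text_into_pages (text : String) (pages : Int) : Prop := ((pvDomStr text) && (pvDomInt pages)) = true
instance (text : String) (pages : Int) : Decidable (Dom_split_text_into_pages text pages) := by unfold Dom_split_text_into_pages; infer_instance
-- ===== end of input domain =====

-- B replaces A's stride loop (slices of range(0, n, spp), early break, remainder merged into the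
-- last page) by one streaming pass over the sentences with an output/buffer accumulator.

-- ===== PORT A =====

-- sentence extraction: the accumulator loop `for part in …: if part.strip(): sentences.append(…)`
def pvSentencesA (text : String) : List String :=
  ((PySem.Str.split? (PySem.Str.replace (PySem.Str.replace text "!" ".") "?" ".") ".").getD []).foldl
    (fun acc part => if PySem.Str.strip part ≠ "" then acc ++ [PySem.Str.strip part ++ "."] else acc) []

-- the `for i in range(0, len(sentences), sentences_per_page)` loop with its early break
def pvPagesLoopA (sentences : List String) (n spp page_count : Int) :
    List Int → List String → List String
  | [], acc => acc
  | i :: rest, acc =>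
    let page_sentences := PySem.List.slice sentences (some i) (some (i + spp))
    let acc' := acc ++ [PySem.Str.join " " page_sentences]
    if (acc'.length : Int) ≥ page_count then
      if i + spp < n then
        let remaining := PySem.Str.join " " (PySem.List.slice sentences (some (i + spp)) none)
        acc'.dropLast ++ [acc'.getLast! ++ " " ++ remaining]
      else acc'
    else pvPagesLoopA sentences n spp page_count rest acc'

def split_text_into_pages (text : String) (pages : Int) : List String :=
  let sentences := pvSentencesA text
  if sentences = [] then []
  else
    let n : Int := sentences.length
    let page_count := min pages n
    let sentences_per_page := max 1 (PySem.Int.floordiv n page_count)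
    pvPagesLoopA sentences n sentences_per_page page_count
      (PySem.List.pyRange 0 n sentences_per_page) []

-- ===== PORT B =====

-- sentence extraction as B's comprehension (filterMap)
def pvSentencesB (text : String) : List String :=
  ((PySem.Str.split? (PySem.Str.replace (PySem.Str.replace text "!" ".") "?" ".") ".").getD []).filterMap
    (fun p => if PySem.Str.strip p ≠ "" then some (PySem.Str.strip p ++ ".") else none)

-- one step of B's streaming loop: append the sentence to the buffer and flush the buffer as a
-- finished page when it holds `per` sentences and fewer than page_count-1 pages exist
def pvStepB (per page_count : Int) (st : List String × List String) (s : String) :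
    List String × List String :=
  let buf := st.2 ++ [s]
  if (buf.length : Int) = per ∧ (st.1.length : Int) < page_count - 1
  then (st.1 ++ [PySem.Str.join " " buf], [])
  else (st.1, buf)

def split_text_into_pages_alt (text : String) (pages : Int) : List String :=
  let sentences := pvSentencesB text
  if sentences = [] then []
  else
    let n : Int := sentences.length
    let page_count := max 1 (min pages n)
    let per := max 1 (PySem.Int.floordiv n page_count)
    let st := sentences.foldl (pvStepB per page_count) ([], [])
    st.1 ++ [PySem.Str.join " " st.2]

-- ===== PRECONDITION & SPEC =====
-- Pre_ excludes pages == 0, where A raises ZeroDivisionError whenever the text contains any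
-- sentence; on sentence-free texts A returns [] there and B returns [] too.
def Pre_split_text_into_pages (text : String) (pages : Int) : Prop := pages ≠ 0
instance (text : String) (pages : Int) : Decidable (Pre_split_text_into_pages text pages) := by
  unfold Pre_split_text_into_pages; infer_instance

def pvWitness_split_text_into_pages : String × Int := ("One. Two! Three? Four.", 3)

-- A raises ZeroDivisionError when pages == 0 and the text contains a sentence (some
-- non-whitespace, non-punctuation character); B returns the whole story as a single page there.
def Raises_split_text_into_pages (text : String) (pages : Int) : Prop :=
  pages = 0 ∧ ¬ (text.toList.all (fun c => c ∈ [' ', '\t', '\n', '\r', '.', '!', '?']) = true)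
instance (text : String) (pages : Int) : Decidable (Raises_split_text_into_pages text pages) := by
  unfold Raises_split_text_into_pages; infer_instance
def pvRaiseWitness_split_text_into_pages : String × Int := ("Hi", 0)
def pvRaiseWitnessOut_split_text_into_pages : List String := ["Hi."]

def Spec_split_text_into_pages (text : String) (pages : Int) (out : List String) : Prop := out = split_text_into_pages_alt text pages
instance (text : String) (pages : Int) (out : List String) : Decidable (Spec_split_text_into_pages text pages out) := by unfold Spec_split_text_into_pages; infer_instance

-- ===== CLAIM (what is proved, stated in full; the proofs are below) =====
def Claim_equal_split_text_into_pages : Prop := ∀ (text : String) (pages : Int), Dom_split_text_into_pages text pages → Pre_split_text_into_pages text pages → Spec_split_text_into_pages text pages (split_text_into_pages text pages)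
def Claim_raises_split_text_into_pages : Prop := (∀ (text : String) (pages : Int), Dom_split_text_into_pages text pages → Raises_split_text_into_pages text pages → ¬ Pre_split_text_into_pages text pages) ∧ (Dom_split_text_into_pages (pvRaiseWitness_split_text_into_pages.1) (pvRaiseWitness_split_text_into_pages.2) ∧ Raises_split_text_into_pages (pvRaiseWitness_split_text_into_pages.1) (pvRaiseWitness_split_text_into_pages.2) ∧ split_text_into_pages_alt (pvRaiseWitness_split_text_into_pages.1) (pvRaiseWitness_split_text_into_pages.2) = pvRaiseWitnessOut_split_text_into_pages)

-- ===== LEMMAS AND PROOFS =====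

-- the two sentence extractions agree (A's accumulator loop vs B's comprehension)
lemma sentFold (f g : String → String) (l : List String) (acc : List String) :
    l.foldl (fun acc part => if f part = "" then acc else acc ++ [g part]) acc
      = acc ++ l.filterMap (fun p => if f p = "" then none else some (g p)) := by
  induction l generalizing acc with
  | nil => simp
  | cons x t ih =>
    by_cases h : f x = ""
    · simp [List.foldl_cons, h, ih]
    · simp only [List.foldl_cons, if_neg h, ih]; simp [h]

lemma sentences_eq (text : String) : pvSentencesA text = pvSentencesB text := by
  unfold pvSentencesA pvSentencesB
  have := sentFold (fun p => PySem.Str.strip p) (fun p => PySem.Str.strip p ++ ".")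
    ((PySem.Str.split? (PySem.Str.replace (PySem.Str.replace text "!" ".") "?" ".") ".").getD []) []
  simp only [ne_eq, ite_not]
  simpa using this

-- pyRange cons step for an arbitrary positive step
lemma pyRange_pos_cons (a b s : Int) (hs : 0 < s) (h : a < b) :
    PySem.List.pyRange a b s = a :: PySem.List.pyRange (a + s) b s := by
  rw [PySem.List.pyRange_of_pos a b hs, PySem.List.pyRange_of_pos (a+s) b hs]
  have he : b - (a+s) + s - 1 = b - a - 1 := by ring
  have hN : ((b - a + s - 1) / s).toNat = ((b - (a+s) + s - 1) / s).toNat + 1 := by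
    have h1 : b - a + s - 1 = (b - (a+s) + s - 1) + 1 * s := by ring
    rw [h1, Int.add_mul_ediv_right _ _ (by omega)]
    have h2 : 0 ≤ (b - (a+s) + s - 1) / s := by
      rw [he]; exact Int.ediv_nonneg (by omega) (by omega)
    omega
  simp only [if_pos h, hN]
  by_cases hab : a + s < b
  · simp only [if_pos hab, List.range_succ_eq_map, List.map_map, List.map_cons]
    congr 1
    · simp
    · apply List.map_congr_left; intro p _; simp [Function.comp]; ring
  · simp only [if_neg hab]
    have h0 : ((b - (a+s) + s - 1) / s).toNat = 0 := by
      rw [he]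
      have hnn := Int.ediv_nonneg (a := b - a - 1) (b := s) (by omega) (by omega)
      have hlt : (b - a - 1) / s < 1 := by
        apply Int.ediv_lt_of_lt_mul (by omega); omega
      omega
    simp [h0]

-- ' '.join splits across a concatenation of two nonempty lists
lemma charsJoin_append (sep : List Char) (xs ys : List (List Char)) (hx : xs ≠ []) (hy : ys ≠ []) :
    PySem.Chars.join sep (xs ++ ys) = PySem.Chars.join sep xs ++ sep ++ PySem.Chars.join sep ys := by
  induction xs with
  | nil => exact absurd rfl hx
  | cons x t ih =>
    cases t with
    | nil =>
      cases ys with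
      | nil => exact absurd rfl hy
      | cons y r => simp [PySem.Chars.join_cons_cons, PySem.Chars.join_singleton]
    | cons x2 t2 =>
      have := ih (by simp)
      simp only [List.cons_append] at *
      rw [PySem.Chars.join_cons_cons, this, PySem.Chars.join_cons_cons]
      simp [List.append_assoc]

lemma strJoin_append (sep : String) (xs ys : List String) (hx : xs ≠ []) (hy : ys ≠ []) :
    PySem.Str.join sep (xs ++ ys) = PySem.Str.join sep xs ++ sep ++ PySem.Str.join sep ys := by
  apply String.toList_inj.mp
  simp only [String.toList_append, PySem.Str.toList_join, List.map_append]
  exact charsJoin_append sep.toList _ _ (by simpa using hx) (by simpa using hy)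

lemma strJoin_take_drop (sep : String) (ss : List String) (c : Nat) (h0 : 0 < c)
    (h1 : c < ss.length) :
    PySem.Str.join sep ss
      = PySem.Str.join sep (ss.take c) ++ sep ++ PySem.Str.join sep (ss.drop c) := by
  conv_lhs => rw [← List.take_append_drop c ss]
  apply strJoin_append
  · have hl : (ss.take c).length = c := by simp; omega
    intro hne; rw [hne] at hl; simp at hl; omega
  · intro hne; have := congrArg List.length hne; simp at this; omega

lemma getLast!_concat (l : List String) (a : String) : (l ++ [a]).getLast! = a := by
  cases l with
  | nil => rfl
  | cons x t =>
    rw [List.getLast!_of_getLast? (l := (x :: t) ++ [a]) (a := a)]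
    rw [List.getLast?_concat]

-- invariant of A's page loop (positive page count k, per-page size m, k*m ≤ n):
-- starting at index j*m with j pages built, it produces the remaining t pages,
-- the last one absorbing every remaining sentence
lemma loopA_eq (ss : List String) (m k : Nat) (hm : 1 ≤ m) (hkm : k * m ≤ ss.length) :
    ∀ t j (acc : List String), j + t = k → 1 ≤ t → acc.length = j →
    pvPagesLoopA ss (ss.length : Int) (m : Int) (k : Int)
        (PySem.List.pyRange ((j * m : Nat) : Int) (ss.length : Int) (m : Int)) acc
      = acc ++ (List.range' j (t - 1)).map (fun i => PySem.Str.join " " ((ss.drop (i * m)).take m))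
          ++ [PySem.Str.join " " (ss.drop ((k - 1) * m))] := by
  intro t
  induction t with
  | zero => omega
  | succ t' ih =>
    intro j acc hjt _ hlen
    have hjk : j + 1 ≤ k := by omega
    have hmul : (j + 1) * m ≤ k * m := Nat.mul_le_mul_right m hjk
    have hexp : (j + 1) * m = j * m + m := by ring
    have hjlt : j * m < ss.length := by omega
    rw [pyRange_pos_cons _ _ _ (by exact_mod_cast hm) (by exact_mod_cast hjlt)]
    rw [pvPagesLoopA]
    simp only [PySem.List.slice_natCast_add, List.length_append, List.length_cons,
      List.length_nil, hlen]
    have hcast : ((j * m : Nat) : Int) + ((m : Nat) : Int) = (((j + 1) * m : Nat) : Int) := by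
      push_cast; ring
    split_ifs with hge hlt
    · -- break branch, remaining sentences merged into the last page
      have ht0 : t' = 0 := by
        have : (j : Int) + (0 + 1) ≥ (k : Int) := by exact_mod_cast hge
        omega
      have hj : j = k - 1 := by omega
      have hrem : j * m + m < ss.length := by
        rw [hcast] at hlt
        have h2 : (j + 1) * m < ss.length := by exact_mod_cast hlt
        omega
      rw [hcast, PySem.List.slice_from_natCast, getLast!_concat, List.dropLast_concat]
      have hsplit := strJoin_take_drop " " (ss.drop (j * m)) m hm
        (by rw [List.length_drop]; omega)
      rw [List.drop_drop] at hsplit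
      subst ht0 hj
      simp only [Nat.add_sub_cancel, List.range'_zero, List.map_nil, List.append_nil]
      rw [hexp, ← hsplit]
    · -- break branch, chunk already reaches the end of the list
      have ht0 : t' = 0 := by
        have : (j : Int) + (0 + 1) ≥ (k : Int) := by exact_mod_cast hge
        omega
      have hj : j = k - 1 := by omega
      have hend : ss.length ≤ j * m + m := by
        rw [hcast] at hlt
        have h2 : ¬ ((j + 1) * m < ss.length) := fun hc => hlt (by exact_mod_cast hc)
        omega
      have htake : (ss.drop (j * m)).take m = ss.drop (j * m) := by
        apply List.take_of_length_le; rw [List.length_drop]; omega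
      subst ht0 hj
      simp [htake]
    · -- no break: one more page built, continue at index (j+1)*m
      have hlt' : j + 1 < k := by
        by_contra hc
        exact hge (by exact_mod_cast (by omega : (j : Int) + (0 + 1) ≥ (k : Int)))
      obtain ⟨t'', rfl⟩ : ∃ t'', t' = t'' + 1 := ⟨t' - 1, by omega⟩
      rw [hcast, ih (j + 1) _ (by omega) (by omega) (by simp [hlen])]
      have hr : List.range' j (t'' + 1 + 1 - 1) = j :: List.range' (j + 1) (t'' + 1 - 1) := by
        simp [List.range'_succ]
      rw [hr]
      simp

-- invariant of B's streaming fold: with j pages flushed and the buffer holding the first b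
-- sentences of page j, the fold finishes the remaining pages, the last one taking all the rest
lemma foldB_inv (ss : List String) (m k : Nat) (hm : 1 ≤ m) (hkm : k * m ≤ ss.length) :
    ∀ (l : List String) (j b : Nat) (out : List String),
      l = ss.drop (j * m + b) → out.length = j → j + 1 ≤ k → (j + 1 < k → b < m) →
      (l.foldl (pvStepB (m : Int) (k : Int)) (out, (ss.drop (j * m)).take b)).1
        ++ [PySem.Str.join " "
              (l.foldl (pvStepB (m : Int) (k : Int)) (out, (ss.drop (j * m)).take b)).2]
      = out ++ (List.range' j (k - 1 - j)).map
            (fun i => PySem.Str.join " " ((ss.drop (i * m)).take m))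
          ++ [PySem.Str.join " " (ss.drop ((k - 1) * m))] := by
  intro l
  induction l with
  | nil =>
    intro j b out hl hlen hjk hb
    have hge : ss.length ≤ j * m + b := by
      have := congrArg List.length hl
      simp [List.length_drop] at this
      omega
    have hj : j = k - 1 := by
      by_contra hne
      have hjlt : j + 1 < k := by omega
      have hbm : b < m := hb hjlt
      have hjb : j * m + b < (j + 1) * m := by
        rw [Nat.succ_mul]; omega
      have h1 : (j + 1) * m ≤ (k - 1) * m := Nat.mul_le_mul_right m (by omega)
      have h2 : (k - 1) * m + m = k * m := by
        cases k with
        | zero => omega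
        | succ k' => simp [Nat.succ_mul]
      omega
    subst hj
    have htake : (ss.drop ((k - 1) * m)).take b = ss.drop ((k - 1) * m) := by
      apply List.take_of_length_le; rw [List.length_drop]; omega
    simp [htake]
  | cons s rest ih =>
    intro j b out hl hlen hjk hb
    have hlt : j * m + b < ss.length := by
      have := congrArg List.length hl
      simp [List.length_drop] at this
      omega
    have hdb : (ss.drop (j * m)).drop b = s :: rest := by
      rw [List.drop_drop]
      exact hl.symm
    have hbuf : (ss.drop (j * m)).take b ++ [s] = (ss.drop (j * m)).take (b + 1) := by
      rw [List.take_add, hdb]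
      rfl
    have hrest : rest = ss.drop (j * m + (b + 1)) := by
      have h1 : ss.drop (j * m + b + 1) = ((ss.drop (j * m + b)).drop 1) := by
        rw [List.drop_drop]
      rw [← hl] at h1
      simp at h1
      rw [show j * m + (b + 1) = j * m + b + 1 from by ring]
      exact h1.symm
    have hbufl : (((ss.drop (j * m)).take (b + 1)).length : Int) = ((b + 1 : Nat) : Int) := by
      congr 1
      simp [List.length_take, List.length_drop]; omega
    have hstep : pvStepB (m : Int) (k : Int) (out, (ss.drop (j * m)).take b) s
        = if (((ss.drop (j * m)).take (b + 1)).length : Int) = (m : Int)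
              ∧ ((out.length : Nat) : Int) < (k : Int) - 1
          then (out ++ [PySem.Str.join " " ((ss.drop (j * m)).take (b + 1))], [])
          else (out, (ss.drop (j * m)).take (b + 1)) := by
      simp only [pvStepB, hbuf]
    rw [List.foldl_cons, hstep]
    by_cases hcond : b + 1 = m ∧ j + 1 < k
    · obtain ⟨hbm, hjlt⟩ := hcond
      have hcpos : (((ss.drop (j * m)).take (b + 1)).length : Int) = (m : Int)
          ∧ ((out.length : Nat) : Int) < (k : Int) - 1 := by
        refine ⟨?_, ?_⟩
        · rw [hbufl]; exact_mod_cast congrArg (Nat.cast : Nat → Int) hbm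
        · rw [hlen]; omega
      rw [if_pos hcpos]
      have hrest' : rest = ss.drop ((j + 1) * m + 0) := by
        rw [hrest]; congr 1; subst hbm; ring
      have htake0 : (ss.drop ((j + 1) * m)).take 0 = [] := rfl
      have hih := ih (j + 1) 0 (out ++ [PySem.Str.join " " ((ss.drop (j * m)).take (b + 1))])
        hrest' (by simp [hlen]) (by omega) (by omega)
      rw [htake0] at hih
      rw [hih]
      have hr : List.range' j (k - 1 - j) = j :: List.range' (j + 1) (k - 1 - (j + 1)) := by
        have he : k - 1 - j = (k - 1 - (j + 1)) + 1 := by omega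
        rw [he, List.range'_succ]
      rw [hr]
      subst hbm
      simp
    · have hcneg : ¬ ((((ss.drop (j * m)).take (b + 1)).length : Int) = (m : Int)
          ∧ ((out.length : Nat) : Int) < (k : Int) - 1) := by
        rintro ⟨h1, h2⟩
        apply hcond
        refine ⟨?_, ?_⟩
        · rw [hbufl] at h1; exact_mod_cast h1
        · rw [hlen] at h2; omega
      rw [if_neg hcneg]
      have hb' : j + 1 < k → b + 1 < m := by
        intro hjlt
        have hbm := hb hjlt
        have hne : b + 1 ≠ m := fun hc => hcond ⟨hc, hjlt⟩
        omega
      exact ih j (b + 1) out hrest hlen hjk hb'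

-- ===== VERDICT (by name: the statement is the Claim_ definition above) =====
theorem split_text_into_pages_spec : Claim_equal_split_text_into_pages := by
  intro text pages _ hpre
  have hp0 : pages ≠ 0 := hpre
  unfold Spec_split_text_into_pages split_text_into_pages split_text_into_pages_alt
  rw [sentences_eq]
  generalize pvSentencesB text = ss
  by_cases hnil : ss = []
  · simp [hnil]
  · simp only [if_neg hnil]
    have hn1 : 1 ≤ ss.length := List.length_pos_iff.mpr hnil
    by_cases hp : 0 < pages
    · -- pages ≥ 1 : both build min(pages, n) pages of n / min(pages, n) sentences
      obtain ⟨kn, hkn⟩ : ∃ kn, min pages.toNat ss.length = kn := ⟨_, rfl⟩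
      have hk1 : 1 ≤ kn := by omega
      have hkn' : kn ≤ ss.length := by omega
      have hkmin : min pages ((ss.length : Nat) : Int) = ((kn : Nat) : Int) := by
        push_cast [← hkn]
        rw [Int.toNat_of_nonneg (by omega)]
      obtain ⟨mn, hmn⟩ : ∃ mn, ss.length / kn = mn := ⟨_, rfl⟩
      have hm1 : 1 ≤ mn := hmn ▸ (Nat.one_le_div_iff (by omega)).mpr hkn'
      have hfd : PySem.Int.floordiv ((ss.length : Nat) : Int) ((kn : Nat) : Int)
          = ((mn : Nat) : Int) := by
        rw [PySem.Int.floordiv_natCast, hmn]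
      have hkm : kn * mn ≤ ss.length := by
        have h := Nat.div_mul_le_self ss.length kn
        rw [hmn] at h
        calc kn * mn = mn * kn := by ring
        _ ≤ ss.length := h
      rw [hkmin]
      rw [show max 1 ((kn : Nat) : Int) = ((kn : Nat) : Int) by omega]
      rw [hfd]
      rw [show max 1 ((mn : Nat) : Int) = ((mn : Nat) : Int) by omega]
      have hA := loopA_eq ss mn kn hm1 hkm kn 0 [] (by omega) hk1 rfl
      simp only [Nat.zero_mul, Nat.cast_zero] at hA
      rw [hA]
      have hB := foldB_inv ss mn kn hm1 hkm ss 0 0 [] (by simp) rfl (by omega) (by omega)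
      simp only [Nat.zero_mul, List.take_zero, List.drop_zero] at hB
      rw [hB]
      simp
    · -- pages ≤ -1 : a single page holding the whole story
      have hneg : pages < 0 := by omega
      -- B's side: page_count = 1, per = n, the buffer is never flushed: one page
      have hmax1 : max 1 (min pages ((ss.length : Nat) : Int)) = ((1 : Nat) : Int) := by
        have : min pages ((ss.length : Nat) : Int) = pages :=
          min_eq_left (le_trans hneg.le (Int.natCast_nonneg ss.length))
        omega
      rw [hmax1]
      have hfd1 : PySem.Int.floordiv ((ss.length : Nat) : Int) ((1 : Nat) : Int)
          = ((ss.length : Nat) : Int) := by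
        rw [PySem.Int.floordiv_natCast, Nat.div_one]
      rw [hfd1]
      rw [show max 1 ((ss.length : Nat) : Int) = ((ss.length : Nat) : Int) by omega]
      have hB := foldB_inv ss ss.length 1 hn1 (by omega) ss 0 0 [] (by simp) rfl
        (by omega) (by omega)
      simp only [Nat.zero_mul, List.take_zero, List.drop_zero] at hB
      rw [hB]
      simp only [Nat.sub_self, List.range'_zero, List.map_nil, Nat.zero_mul,
        List.drop_zero, List.nil_append]
      -- A's side: page_count = pages < 0, per = 1, one iteration then break
      have hminp : min pages ((ss.length : Nat) : Int) = pages :=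
        min_eq_left (le_trans hneg.le (Int.natCast_nonneg ss.length))
      rw [hminp]
      have hfd0 : PySem.Int.floordiv ((ss.length : Nat) : Int) pages < 0 := by
        have hmb := PySem.Int.mod_neg_bounds ((ss.length : Nat) : Int) hneg
        have hfm := PySem.Int.floordiv_mul_add_mod ((ss.length : Nat) : Int) pages
        by_contra hc
        rw [not_lt] at hc
        have h0 : PySem.Int.floordiv ((ss.length : Nat) : Int) pages * pages ≤ 0 :=
          mul_nonpos_iff.mpr (Or.inl ⟨hc, by omega⟩)
        have hcast : (1 : Int) ≤ ((ss.length : Nat) : Int) := by exact_mod_cast hn1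
        omega
      rw [show max 1 (PySem.Int.floordiv ((ss.length : Nat) : Int) pages) = 1 by omega]
      rw [pyRange_pos_cons 0 ((ss.length : Nat) : Int) 1 one_pos (by exact_mod_cast hn1)]
      rw [pvPagesLoopA]
      simp only [List.nil_append, List.length_cons, List.length_nil, zero_add]
      rw [if_pos (by omega : ((1 : Nat) : Int) ≥ pages)]
      have hsl1 : PySem.List.slice ss (some 0) (some 1) = ss.take 1 := by
        rw [PySem.List.slice_zero_start, show (1 : Int) = ((1 : Nat) : Int) by norm_num,
          PySem.List.slice_to_natCast]
      by_cases h2 : (1 : Int) < ((ss.length : Nat) : Int)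
      · rw [if_pos h2]
        have hn2 : 1 < ss.length := by exact_mod_cast h2
        have hfrom : PySem.List.slice ss (some (1 : Int)) none = ss.drop 1 := by
          rw [show (1 : Int) = ((1 : Nat) : Int) by norm_num]
          rw [PySem.List.slice_from_natCast]
        rw [hsl1, hfrom]
        rw [show ([PySem.Str.join " " (ss.take 1)]).getLast!
              = PySem.Str.join " " (ss.take 1) from rfl]
        rw [show ([PySem.Str.join " " (ss.take 1)]).dropLast = ([] : List String) from rfl]
        simp only [List.nil_append]
        rw [← strJoin_take_drop " " ss 1 one_pos hn2]
      · rw [if_neg h2]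
        have hn2 : ss.length = 1 := by
          have hx : ¬ ((1 : Nat) < ss.length) := fun hc => h2 (by exact_mod_cast hc)
          omega
        rw [hsl1, List.take_of_length_le (by omega)]

theorem split_text_into_pages_raises : Claim_raises_split_text_into_pages := by
  unfold Claim_raises_split_text_into_pages
  exact ⟨fun _ p _ hr hp => hp hr.1, by decide⟩

-- witness self-check: the crash-fix value at pvRaiseWitness_ is the one split_text_into_pages_raises proves
theorem pvRaiseWitness_returns_ok :
    split_text_into_pages_alt pvRaiseWitness_split_text_into_pages.1
      pvRaiseWitness_split_text_into_pages.2 = pvRaiseWitnessOut_split_text_into_pages :=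
  split_text_into_pages_raises.2.2.2
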